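-- pv_equiv track=rewrite | github.com/981377660LMT/algorithm-study | 6_tree/树状数组/经典题/维护个数与值域和的值域树状数组/E - Make it Palindrome.py | makeItPalindrome
-- ===== SOURCE A (Python) =====
-- from collections import defaultdict
-- from typing import List
--
-- def makeItPalindrome(nums: List[int]) -> int:
--     n = len(nums)
--     mp = defaultdict(list)
--     for i, char in enumerate(nums):
--         mp[char].append(i)
--
--     res = 0
--     for len_ in range(1, n + 1):
--         res += (len_ // 2) * (n - len_ + 1)
--
--     for group in mp.values():
--         if len(group) == 1:
--             continue
--         dist1 = [num + 1 for num in group]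
--         dist2 = [n - num for num in group]
--         bitSum, bitCount = BIT1(n + 10), BIT1(n + 10)
--         for i, v in enumerate(dist2):
--             bitSum.add(v, v)
--             bitCount.add(v, 1)
--         for i in range(len(group)):
--             bitSum.add(dist2[i], -dist2[i])
--             bitCount.add(dist2[i], -1)
--             rigthBigger = bitCount.queryRange(dist1[i], n + 1)
--             rightSmallSum = bitSum.queryRange(0, dist1[i] - 1)
--             res -= rigthBigger * dist1[i] + rightSmallSum  # 右侧比自己距离左侧小的距离之和 + 右侧距离大于等于自己的位置个数*左侧距离
--     return res
--
-- class BIT1: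
--     """单点修改"""
--
--     __slots__ = "size", "bit", "tree"
--
--     def __init__(self, n: int):
--         self.size = n
--         self.bit = n.bit_length()
--         self.tree = dict()
--
--     def add(self, index: int, delta: int) -> None:
--         # assert index >= 1, 'index must be greater than 0'
--         while index <= self.size:
--             self.tree[index] = self.tree.get(index, 0) + delta
--             index += index & -index
--
--     def query(self, index: int) -> int:
--         if index > self.size:
--             index = self.size
--         res = 0
--         while index > 0:
--             res += self.tree.get(index, 0)
--             index -= index & -index
--         return res
--
--     def queryRange(self, left: int, right: int) -> int:
--         return self.query(right) - self.query(left - 1)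
--
--     def bisectLeft(self, k: int) -> int:
--         """返回第一个前缀和大于等于k的位置pos
--
--         1 <= pos <= self.size + 1
--         """
--         curSum, pos = 0, 0
--         for i in range(self.bit, -1, -1):
--             nextPos = pos + (1 << i)
--             if nextPos <= self.size and curSum + self.tree.get(nextPos, 0) < k:
--                 pos = nextPos
--                 curSum += self.tree.get(pos, 0)
--         return pos + 1
--
--     def bisectRight(self, k: int) -> int:
--         """返回第一个前缀和大于k的位置pos
--
--         1 <= pos <= self.size + 1
--         """
--         curSum, pos = 0, 0
--         for i in range(self.bit, -1, -1):
--             nextPos = pos + (1 << i)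
--             if nextPos <= self.size and curSum + self.tree.get(nextPos, 0) <= k:
--                 pos = nextPos
--                 curSum += self.tree.get(pos, 0)
--         return pos + 1
--
--     def __repr__(self) -> str:
--         preSum = []
--         for i in range(self.size):
--             preSum.append(self.query(i))
--         return str(preSum)
--
--     def __len__(self) -> int:
--         return self.size
-- ===== SOURCE B (Python) =====
-- from typing import List
--
--
-- def makeItPalindrome(nums: List[int]) -> int:
--     n = len(nums)
--     res = sum((L // 2) * (n - L + 1) for L in range(1, n + 1))
--     groups = {}
--     for i, v in enumerate(nums):
--         groups.setdefault(v, []).append(i)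
--     for g in groups.values():
--         for a in range(len(g)):
--             x = g[a] + 1
--             for y in g[a + 1:]:
--                 res -= min(x, n - y)
--     return res
-- ===== Notes on version B (the rewrite author's own statement) =====
-- stated objective: simpler
-- what changed: Replaced the two value-indexed Fenwick trees (BIT over a dict) and their range queries by a direct per-group pairwise sum of min(left_dist, right_dist), since rightBigger*d1 + rightSmallSum is exactly sum of min(d1[i], d2[j]) over later j.
import Mathlib
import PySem

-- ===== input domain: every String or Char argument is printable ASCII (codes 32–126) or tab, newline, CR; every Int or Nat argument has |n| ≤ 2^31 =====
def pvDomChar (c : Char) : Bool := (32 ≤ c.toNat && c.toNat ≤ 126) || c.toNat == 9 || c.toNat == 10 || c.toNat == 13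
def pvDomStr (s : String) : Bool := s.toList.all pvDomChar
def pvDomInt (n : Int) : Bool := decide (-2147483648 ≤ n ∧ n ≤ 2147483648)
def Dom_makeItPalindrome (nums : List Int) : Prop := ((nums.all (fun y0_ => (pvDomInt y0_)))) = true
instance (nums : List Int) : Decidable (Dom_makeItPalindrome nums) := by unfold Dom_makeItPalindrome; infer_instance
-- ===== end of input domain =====

-- B replaces A's two value-indexed Fenwick trees by a direct per-group pairwise
-- sum of min(left distance, right distance); objective: simpler (no speed claim).

-- ===== PORT A =====
-- 'index & -index' as written in BIT1.add / BIT1.query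
def pvLowb (i : Int) : Int := PySem.Int.band i (-i)

-- BIT1.add: 'while index <= size: tree[index] = tree.get(index,0) + delta; index += index & -index'
-- (the '0 < pvLowb index' guard only makes the loop total; on every call A performs, index ≥ 1 and the guard holds)
def pvBitAdd (size : Int) (tree : PySem.Dict Int Int) (index delta : Int) : PySem.Dict Int Int :=
  if h1 : index ≤ size then
    let t' := tree.insert index (tree.getD index 0 + delta)
    if h2 : 0 < pvLowb index then pvBitAdd size t' (index + pvLowb index) delta else t'
  else tree
termination_by (size + 1 - index).toNat
decreasing_by omega

-- BIT1.query main loop: 'while index > 0: res += tree.get(index, 0); index -= index & -index'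
-- (same totality guard on pvLowb)
def pvBitQueryLoop (tree : PySem.Dict Int Int) (index res : Int) : Int :=
  if h1 : 0 < index then
    let res' := res + tree.getD index 0
    if h2 : 0 < pvLowb index then pvBitQueryLoop tree (index - pvLowb index) res' else res'
  else res
termination_by index.toNat
decreasing_by omega

-- BIT1.query: 'if index > self.size: index = self.size' then the loop with res = 0
def pvBitQuery (size : Int) (tree : PySem.Dict Int Int) (index : Int) : Int :=
  pvBitQueryLoop tree (if size < index then size else index) 0

-- BIT1.queryRange
def pvQueryRange (size : Int) (tree : PySem.Dict Int Int) (left right : Int) : Int :=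
  pvBitQuery size tree right - pvBitQuery size tree (left - 1)

def makeItPalindrome (nums : List Int) : Int :=
  let n : Int := nums.length
  let mp := (PySem.List.enumerate nums).foldl
      (fun d p => d.modify p.2 [] (fun l => l ++ [p.1])) PySem.Dict.empty
  let res0 := (PySem.List.pyRange 1 (n + 1)).foldl
      (fun r len_ => r + PySem.Int.floordiv len_ 2 * (n - len_ + 1)) 0
  (mp.values).foldl (fun res group =>
    if group.length = 1 then res
    else
      let dist1 := group.map (fun num => num + 1)
      let dist2 := group.map (fun num => n - num)
      let size := n + 10
      let ts := (PySem.List.enumerate dist2).foldl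
          (fun (t : PySem.Dict Int Int × PySem.Dict Int Int) p =>
            (pvBitAdd size t.1 p.2 p.2, pvBitAdd size t.2 p.2 1))
          (PySem.Dict.empty, PySem.Dict.empty)
      let fin := (PySem.List.pyRange 0 (group.length : Int)).foldl
          (fun (st : PySem.Dict Int Int × PySem.Dict Int Int × Int) i =>
            let bitSum := pvBitAdd size st.1 (PySem.List.pyGetD dist2 i 0) (-(PySem.List.pyGetD dist2 i 0))
            let bitCount := pvBitAdd size st.2.1 (PySem.List.pyGetD dist2 i 0) (-1)
            let rightBigger := pvQueryRange size bitCount (PySem.List.pyGetD dist1 i 0) (n + 1)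
            let rightSmallSum := pvQueryRange size bitSum 0 (PySem.List.pyGetD dist1 i 0 - 1)
            (bitSum, bitCount, st.2.2 - (rightBigger * PySem.List.pyGetD dist1 i 0 + rightSmallSum)))
          (ts.1, ts.2, res)
      fin.2.2) res0

-- ===== PORT B =====
def makeItPalindrome_alt (nums : List Int) : Int :=
  let n : Int := nums.length
  let res0 := ((PySem.List.pyRange 1 (n + 1)).map
      (fun L => PySem.Int.floordiv L 2 * (n - L + 1))).sum
  -- groups.setdefault(v, []).append(i) : groups[v] = groups.get(v, []) + [i]
  let groups := (PySem.List.enumerate nums).foldl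
      (fun d p => d.modify p.2 [] (fun l => l ++ [p.1])) PySem.Dict.empty
  (groups.values).foldl (fun res g =>
    (PySem.List.pyRange 0 (g.length : Int)).foldl (fun res a =>
      let x := PySem.List.pyGetD g a 0 + 1
      (PySem.List.slice g (some (a + 1))).foldl (fun res y => res - min x (n - y)) res) res) res0

-- ===== PRECONDITION & SPEC =====
def Spec_makeItPalindrome (nums : List Int) (out : Int) : Prop := out = makeItPalindrome_alt nums
instance (nums : List Int) (out : Int) : Decidable (Spec_makeItPalindrome nums out) := by unfold Spec_makeItPalindrome; infer_instance

-- ===== CLAIM (what is proved, stated in full; the proofs are below) =====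
def Claim_equal_makeItPalindrome : Prop := ∀ (nums : List Int), Dom_makeItPalindrome nums → Spec_makeItPalindrome nums (makeItPalindrome nums)

-- ===== LEMMAS AND PROOFS =====


theorem pv_and_odd (c : Nat) : (2*c+1) &&& (2*c) = 2*c := by
  apply Nat.eq_of_testBit_eq
  intro i
  cases i with
  | zero => simp [Nat.testBit_zero]
  | succ j =>
      rw [Nat.testBit_and, Nat.testBit_add_one, Nat.testBit_add_one,
          show (2*c+1)/2 = c by omega, show (2*c)/2 = c by omega]
      simp
theorem pv_and_even (c : Nat) (h : 0 < c) : (2*c) &&& (2*c-1) = 2 * (c &&& (c-1)) := by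
  apply Nat.eq_of_testBit_eq
  intro i
  cases i with
  | zero => simp [Nat.testBit_zero]
  | succ j =>
      rw [Nat.testBit_and, Nat.testBit_add_one, Nat.testBit_add_one, Nat.testBit_add_one,
          show (2*c)/2 = c by omega, show (2*c-1)/2 = c-1 by omega,
          show (2*(c &&& (c-1)))/2 = c &&& (c-1) by omega, Nat.testBit_and]
theorem pvLowbNat_spec (m : Nat) (h : 0 < m) :
    ∃ s : Nat, m - (m &&& (m - 1)) = 2 ^ s ∧ 2 ^ s ∣ m ∧ ¬ 2 ^ (s + 1) ∣ m := by
  induction m using Nat.strong_induction_on with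
  | _ m IH =>
    rcases Nat.even_or_odd m with ⟨c, hc⟩ | ⟨c, hc⟩
    · have hc' : 0 < c := by omega
      obtain ⟨s, h1, h2, h3⟩ := IH c (by omega) hc'
      have hp : (2:Nat) ^ (s+1) = 2 ^ s * 2 := pow_succ 2 s
      have hp2 : (2:Nat) ^ (s+2) = 2 ^ s * 2 * 2 := by rw [pow_succ, pow_succ]
      refine ⟨s+1, ?_, ?_, ?_⟩
      · rw [show m = 2*c by omega, pv_and_even c hc']
        have : c &&& (c-1) ≤ c := Nat.and_le_left
        rw [hp]; omega
      · rcases h2 with ⟨k, hk⟩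
        refine ⟨k, ?_⟩
        rw [hp, show m = 2*c by omega, hk]; ring
      · intro hd
        apply h3
        rcases hd with ⟨k, hk⟩
        rw [hp2] at hk
        refine ⟨k, ?_⟩
        rw [hp]
        have hr : (2:Nat)^s*2*2*k = 2*(2^s*2*k) := by ring
        rw [hr] at hk
        omega
    · refine ⟨0, ?_, ?_, ?_⟩
      · rw [show m = 2*c+1 by omega, show 2*c+1-1 = 2*c by omega, pv_and_odd]; omega
      · simp
      · intro ⟨k, hk⟩; omega

theorem pvLowb_eq_nat (m : Nat) (h : 0 < m) :
    pvLowb (m : Int) = ((m - (m &&& (m - 1)) : Nat) : Int) := by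
  unfold pvLowb PySem.Int.band
  have h1 : (0:Int) ≤ (m:Int) := by positivity
  have h2 : ¬ (0:Int) ≤ -(m:Int) := by omega
  simp [h1, h2]
  intro h0; omega
theorem pvLowb_spec (i : Int) (h : 0 < i) :
    ∃ s : Nat, pvLowb i = 2 ^ s ∧ (2 : Int) ^ s ∣ i ∧ ¬ ((2 : Int) ^ (s + 1) ∣ i) := by
  obtain ⟨m, rfl⟩ : ∃ m : Nat, i = (m : Int) := ⟨i.toNat, by omega⟩
  have hm : 0 < m := by exact_mod_cast h
  obtain ⟨s, h1, h2, h3⟩ := pvLowbNat_spec m hm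
  refine ⟨s, ?_, ?_, ?_⟩
  · rw [pvLowb_eq_nat m hm, h1]; push_cast; ring
  · exact_mod_cast Int.natCast_dvd_natCast.mpr h2
  · intro hd
    apply h3
    exact_mod_cast hd
theorem pvLowb_pos {i : Int} (h : 0 < i) : 0 < pvLowb i := by
  obtain ⟨s, hs, -, -⟩ := pvLowb_spec i h
  rw [hs]; positivity
theorem pvLowb_double {i : Int} (h : 0 < i) : 2 * pvLowb i ≤ pvLowb (i + pvLowb i) := by
  obtain ⟨s, hs, hd, hnd⟩ := pvLowb_spec i h
  have h2 : (0:Int) < i + pvLowb i := by have := pvLowb_pos h; omega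
  obtain ⟨t, ht, htd, htnd⟩ := pvLowb_spec _ h2
  -- 2^(s+1) divides i + 2^s
  have hdd : (2:Int) ^ (s+1) ∣ i + pvLowb i := by
    rcases hd with ⟨k, hk⟩
    have hodd : Odd k := by
      rcases Int.even_or_odd k with he | ho
      · exfalso; apply hnd; rcases he with ⟨j, hj⟩
        exact ⟨j, by rw [hk, hj, pow_succ]; ring⟩
      · exact ho
    rcases hodd with ⟨j, hj⟩
    exact ⟨j + 1, by rw [hs, hk, hj, pow_succ]; ring⟩
  -- so t ≥ s+1
  have hts : s + 1 ≤ t := by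
    by_contra hlt
    push_neg at hlt
    apply htnd
    exact dvd_trans (pow_dvd_pow 2 (by omega : t + 1 ≤ s + 1)) hdd
  rw [ht, hs]
  calc 2 * (2:Int)^s = 2^(s+1) := by rw [pow_succ]; ring
    _ ≤ 2^t := by apply pow_le_pow_right₀ <;> omega

def pvQChain (q : Int) : List Int :=
  if h : 0 < q then q :: pvQChain (q - pvLowb q) else []
termination_by q.toNat
decreasing_by have := pvLowb_pos h; omega

def pvAChain (size p : Int) : List Int :=
  if h : 0 < p ∧ p ≤ size then p :: pvAChain size (p + pvLowb p) else []
termination_by (size + 1 - p).toNat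
decreasing_by have := pvLowb_pos h.1; omega


theorem pvMem_qchain {x q : Int} (hx : x ∈ pvQChain q) : 0 < x ∧ x ≤ q := by
  by_cases h : 0 < q
  · rw [pvQChain] at hx
    simp [h] at hx
    rcases hx with rfl | hx
    · omega
    · have := pvMem_qchain hx
      have := pvLowb_pos h
      omega
  · rw [pvQChain] at hx; simp [h] at hx
termination_by q.toNat
decreasing_by have := pvLowb_pos h; omega

theorem pvMem_achain_lower {size p x : Int} (hx : x ∈ pvAChain size p) : p ≤ x := by
  by_cases h : 0 < p ∧ p ≤ size
  · rw [pvAChain] at hx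
    simp [h] at hx
    rcases hx with rfl | hx
    · omega
    · have := pvMem_achain_lower hx
      have := pvLowb_pos h.1
      omega
  · rw [pvAChain] at hx; simp [h] at hx
termination_by (size + 1 - p).toNat
decreasing_by have := pvLowb_pos h.1; omega

theorem pvAchain_upper {size p x : Int} (hp : 0 < p) (hx : x ∈ pvAChain size p) :
    x - pvLowb x ≤ p - pvLowb p := by
  by_cases h : 0 < p ∧ p ≤ size
  · rw [pvAChain] at hx
    simp [h] at hx
    rcases hx with rfl | hx
    · omega
    · have hl := pvLowb_pos hp
      have hp' : (0:Int) < p + pvLowb p := by omega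
      have := pvAchain_upper hp' hx
      have := pvLowb_double hp
      omega
  · rw [pvAChain] at hx; simp [h] at hx
termination_by (size + 1 - p).toNat
decreasing_by have := pvLowb_pos hp; omega

theorem pvAchain_reach {size p q : Int} (hp : 0 < p) (h1 : q - pvLowb q < p) (h2 : p ≤ q)
    (h3 : q ≤ size) : q ∈ pvAChain size p := by
  have hps : p ≤ size := by omega
  rw [pvAChain]
  simp [hp, hps]
  rcases eq_or_lt_of_le h2 with rfl | hlt
  · left; rfl
  · right
    -- p < q : show the chain step stays ≤ q and above q - lowb q
    have hq : (0:Int) < q := by omega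
    obtain ⟨s, hs, hsd, hsnd⟩ := pvLowb_spec p hp
    obtain ⟨t, ht, htd, htnd⟩ := pvLowb_spec q hq
    have hst : s < t := by
      rcases Nat.lt_or_ge s t with h | h
      · exact h
      · exfalso
        have hts : (2:Int)^t ∣ 2^s := pow_dvd_pow 2 h
        have hdq : (2:Int)^t ∣ q - p := dvd_sub htd (dvd_trans hts hsd)
        have hpos : (0:Int) < q - p := by omega
        have := Int.le_of_dvd hpos hdq
        rw [ht] at h1
        omega
    have hsq : (2:Int)^s ∣ q := dvd_trans (pow_dvd_pow 2 (by omega : s ≤ t)) htd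
    have hdqp : (2:Int)^s ∣ q - p := dvd_sub hsq hsd
    have hle : (2:Int)^s ≤ q - p := Int.le_of_dvd (by omega) hdqp
    have hstep : p + pvLowb p ≤ q := by rw [hs]; omega
    have hlp := pvLowb_pos hp
    exact pvAchain_reach (by omega) (by omega) hstep h3
termination_by (q - p).toNat
decreasing_by have := pvLowb_pos hp; omega

theorem pvCount_inter {size p q : Int} (hp : 0 < p) (hps : p ≤ size) (hqs : q ≤ size) :
    ((pvQChain q).countP (fun x => decide (x ∈ pvAChain size p))) = if p ≤ q then 1 else 0 := by
  by_cases hq : 0 < q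
  · rw [pvQChain]
    simp only [hq, dite_true, List.countP_cons]
    have hq' : q - pvLowb q ≤ size := by have := pvLowb_pos hq; omega
    rw [pvCount_inter hp hps hq']
    by_cases hpq' : p ≤ q - pvLowb q
    · have hnq : q ∉ pvAChain size p := by
        intro hmem
        have := pvAchain_upper hp hmem
        have := pvLowb_pos hp
        omega
      simp [hpq', hnq]
      have := pvLowb_pos hq
      omega
    · by_cases hpq : p ≤ q
      · have hq2 : q ∈ pvAChain size p := pvAchain_reach hp (by omega) hpq hqs
        simp [hpq', hpq, hq2]
      · have hnq : q ∉ pvAChain size p := by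
          intro hmem
          have := pvMem_achain_lower hmem
          omega
        simp [hpq', hpq, hnq]
  · rw [pvQChain]
    simp [hq]
    omega
termination_by q.toNat
decreasing_by have := pvLowb_pos hq; omega

theorem pvQueryLoop_eq (t : PySem.Dict Int Int) (q r : Int) :
    pvBitQueryLoop t q r = r + ((pvQChain q).map (fun k => t.getD k 0)).sum := by
  by_cases h : 0 < q
  · rw [pvBitQueryLoop, pvQChain]
    have hl := pvLowb_pos h
    simp only [h, dite_true, hl]
    rw [pvQueryLoop_eq t (q - pvLowb q) (r + t.getD q 0)]
    simp
    ring
  · rw [pvBitQueryLoop, pvQChain]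
    simp [h]
termination_by q.toNat
decreasing_by have := pvLowb_pos h; omega

theorem pvBitAdd_getD (size : Int) (t : PySem.Dict Int Int) {p : Int} (δ k : Int) (hp : 0 < p) :
    (pvBitAdd size t p δ).getD k 0 = t.getD k 0 + (if k ∈ pvAChain size p then δ else 0) := by
  by_cases h1 : p ≤ size
  · rw [pvBitAdd, pvAChain]
    have hl := pvLowb_pos hp
    simp only [h1, dite_true, hl, hp, and_self]
    have hp' : (0:Int) < p + pvLowb p := by omega
    rw [pvBitAdd_getD size _ δ k hp']
    rw [PySem.Dict.getD_insert]
    by_cases hk : k = p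
    · subst hk
      have hnot : k ∉ pvAChain size (k + pvLowb k) := by
        intro hmem
        have := pvMem_achain_lower hmem
        omega
      simp [hnot]
    · simp [hk, List.mem_cons]
  · rw [pvBitAdd, pvAChain]
    simp [h1, hp]
termination_by (size + 1 - p).toNat
decreasing_by have := pvLowb_pos hp; omega

theorem pvSum_map_ite (l : List Int) (P : Int → Prop) [DecidablePred P] (δ : Int) :
    (l.map (fun k => if P k then δ else 0)).sum = δ * (l.countP (fun k => decide (P k)) : Int) := by
  induction l with
  | nil => simp
  | cons x xs ih =>
    simp only [List.map_cons, List.sum_cons, List.countP_cons, ih]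
    by_cases hx : P x <;> simp [hx] <;> push_cast <;> ring

theorem pvQueryLoop_add (size : Int) (t : PySem.Dict Int Int) {p : Int} (δ q : Int)
    (hp : 0 < p) (hps : p ≤ size) (hqs : q ≤ size) :
    pvBitQueryLoop (pvBitAdd size t p δ) q 0 = pvBitQueryLoop t q 0 + (if p ≤ q then δ else 0) := by
  rw [pvQueryLoop_eq, pvQueryLoop_eq]
  have hmap : (pvQChain q).map (fun k => (pvBitAdd size t p δ).getD k 0)
      = (pvQChain q).map (fun k => t.getD k 0 + (if k ∈ pvAChain size p then δ else 0)) := by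
    apply List.map_congr_left
    intro k _
    exact pvBitAdd_getD size t δ k hp
  rw [hmap]
  rw [show ((pvQChain q).map (fun k => t.getD k 0 + (if k ∈ pvAChain size p then δ else 0))).sum
      = ((pvQChain q).map (fun k => t.getD k 0)).sum
        + ((pvQChain q).map (fun k => if k ∈ pvAChain size p then δ else 0)).sum by
    induction pvQChain q with
    | nil => simp
    | cons a l ih => simp only [List.map_cons, List.sum_cons, ih]; ring]
  rw [pvSum_map_ite _ (fun k => k ∈ pvAChain size p) δ, pvCount_inter hp hps hqs]
  by_cases hpq : p ≤ q <;> simp [hpq] <;> ring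

theorem pvQueryLoop_empty (q : Int) : pvBitQueryLoop (PySem.Dict.empty : PySem.Dict Int Int) q 0 = 0 := by
  rw [pvQueryLoop_eq]
  simp [PySem.Dict.getD_empty]

def pvAdds (size : Int) (t : PySem.Dict Int Int) (ps : List (Int × Int)) : PySem.Dict Int Int :=
  ps.foldl (fun t p => pvBitAdd size t p.1 p.2) t

theorem pvAdds_query (size : Int) (t : PySem.Dict Int Int) (ps : List (Int × Int)) (q : Int)
    (hps : ∀ p ∈ ps, 0 < p.1 ∧ p.1 ≤ size) (hqs : q ≤ size) :
    pvBitQueryLoop (pvAdds size t ps) q 0 =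
      pvBitQueryLoop t q 0 + ((ps.filter (fun p => decide (p.1 ≤ q))).map (·.2)).sum := by
  induction ps generalizing t with
  | nil => simp [pvAdds]
  | cons a l ih =>
    have ha := hps a (List.mem_cons_self ..)
    rw [pvAdds, List.foldl_cons, show List.foldl (fun t p => pvBitAdd size t p.1 p.2)
        (pvBitAdd size t a.1 a.2) l = pvAdds size (pvBitAdd size t a.1 a.2) l from rfl]
    rw [ih _ (fun p hp => hps p (List.mem_cons_of_mem _ hp))]
    rw [pvQueryLoop_add size t a.2 q ha.1 ha.2 hqs]
    rw [List.filter_cons]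
    by_cases hq : a.1 ≤ q <;> simp [hq] <;> ring

def pvContrib (n : Int) (g : List Int) (j : Nat) : Int :=
  ((g.drop (j+1)).map (fun y => min (g.getD j 0 + 1) (n - y))).sum

def pvS (n : Int) (g : List Int) : Int := ((List.range g.length).map (pvContrib n g)).sum

theorem pvFoldl_sub {α : Type} (l : List α) (f : α → Int) (a : Int) :
    l.foldl (fun acc x => acc - f x) a = a - (l.map f).sum := by
  induction l generalizing a with
  | nil => simp
  | cons x xs ih => simp [ih]; ring

theorem pvFilt_sum (l : List Int) (f : Int → Int) (c : Int) :
    (((l.map (fun v => (v, f v))).filter (fun p => decide (p.1 ≤ c))).map (·.2)).sum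
      = ((l.filter (fun v => decide (v ≤ c))).map f).sum := by
  induction l with
  | nil => simp
  | cons x xs ih =>
    simp only [List.map_cons, List.filter_cons]
    by_cases hx : x ≤ c <;> simp [hx, ih]

theorem pvSum_const_one (l : List Int) (P : Int → Bool) :
    ((l.filter P).map (fun _ => (1:Int))).sum = (l.countP P : Int) := by
  rw [List.map_const', List.sum_replicate, nsmul_eq_mul, mul_one]
  simp [List.countP_eq_length_filter]

theorem pvMinSplit (l : List Int) (a : Int) :
    ((l.length : Int) - (l.countP (fun v => decide (v ≤ a - 1)) : Int)) * a
      + ((l.filter (fun v => decide (v ≤ a - 1))).map (fun v => v)).sum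
      = (l.map (fun x => min a x)).sum := by
  induction l with
  | nil => simp
  | cons x xs ih =>
    simp only [List.length_cons, List.countP_cons, List.filter_cons, List.map_cons, List.sum_cons]
    by_cases hx : x ≤ a - 1
    · simp only [hx, decide_true, if_true]
      push_cast
      rw [show min a x = x by omega]
      simp only [List.map_cons, List.sum_cons]
      rw [← ih]; push_cast; ring
    · simp only [hx, decide_false, if_false]
      rw [show min a x = a by omega]
      rw [← ih]; push_cast; ring

-- the two queries of step i, on trees holding d2 with the first (i+1) removed
theorem pvQueryVal (size n : Int) (d2 : List Int) (k : Nat) (f : Int → Int) (c : Int)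
    (hd : ∀ x ∈ d2, 0 < x ∧ x ≤ n) (hsize : size = n + 10) (hc : c ≤ size) :
    pvBitQueryLoop (pvAdds size PySem.Dict.empty
        (d2.map (fun v => (v, f v)) ++ (d2.take k).map (fun v => (v, -f v)))) c 0
      = (((d2.drop k).filter (fun v => decide (v ≤ c))).map f).sum := by
  have hb : ∀ p ∈ d2.map (fun v => (v, f v)) ++ (d2.take k).map (fun v => (v, -f v)),
      0 < p.1 ∧ p.1 ≤ size := by
    intro p hp
    rcases List.mem_append.mp hp with h | h <;>
    · obtain ⟨v, hv, rfl⟩ := List.mem_map.mp h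
      first
        | (have := hd v hv; simp; omega)
        | (have := hd v (List.mem_of_mem_take hv); simp; omega)
  rw [pvAdds_query size _ _ c hb hc, pvQueryLoop_empty]
  rw [List.filter_append, List.map_append, List.sum_append]
  have h1 := pvFilt_sum d2 f c
  have h2 := pvFilt_sum (d2.take k) (fun v => -f v) c
  simp only at h1 h2
  rw [h1, h2]
  have hsplit : ((d2.filter (fun v => decide (v ≤ c))).map f).sum
      = (((d2.take k).filter (fun v => decide (v ≤ c))).map f).sum
        + (((d2.drop k).filter (fun v => decide (v ≤ c))).map f).sum := by
    conv_lhs => rw [← List.take_append_drop k d2]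
    rw [List.filter_append, List.map_append, List.sum_append]
  rw [hsplit]
  have hneg : (((d2.take k).filter (fun v => decide (v ≤ c))).map (fun v => -f v)).sum
      = -(((d2.take k).filter (fun v => decide (v ≤ c))).map f).sum := by
    induction ((d2.take k).filter (fun v => decide (v ≤ c))) with
    | nil => simp
    | cons x xs ih => simp [ih]; ring
  rw [hneg]
  ring

theorem pvStepContrib (n : Int) (g : List Int) (i : Nat) (hi : i < g.length)
    (hg : ∀ x ∈ g, 0 ≤ x ∧ x < n) :
    pvQueryRange (n+10) (pvAdds (n+10) PySem.Dict.empty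
        ((g.map (fun num => n - num)).map (fun v => (v,(1:Int)))
          ++ ((g.map (fun num => n - num)).take (i+1)).map (fun v => (v,(-1:Int)))))
        (g[i] + 1) (n+1) * (g[i] + 1)
      + pvQueryRange (n+10) (pvAdds (n+10) PySem.Dict.empty
        ((g.map (fun num => n - num)).map (fun v => (v,v))
          ++ ((g.map (fun num => n - num)).take (i+1)).map (fun v => (v,-v))))
        0 (g[i] + 1 - 1)
      = pvContrib n g i := by
  have hgi := hg g[i] (List.getElem_mem hi)
  have hn : (1:Int) ≤ n := by omega
  set d2 := g.map (fun num => n - num) with hd2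
  have hd : ∀ x ∈ d2, 0 < x ∧ x ≤ n := by
    intro x hx
    obtain ⟨y, hy, rfl⟩ := List.mem_map.mp hx
    have := hg y hy
    omega
  unfold pvQueryRange pvBitQuery
  rw [if_neg (by omega : ¬ (n+10 < n+1)), if_neg (by omega : ¬ (n+10 < g[i] + 1 - 1)),
      if_neg (by omega : ¬ (n+10 < (0:Int) - 1))]
  rw [pvQueryVal (n+10) n d2 (i+1) (fun _ => (1:Int)) (n+1) hd rfl (by omega)]
  rw [pvQueryVal (n+10) n d2 (i+1) (fun _ => (1:Int)) (g[i] + 1 - 1) hd rfl (by omega)]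
  rw [pvQueryVal (n+10) n d2 (i+1) (fun v => v) (g[i] + 1 - 1) hd rfl (by omega)]
  rw [pvQueryVal (n+10) n d2 (i+1) (fun v => v) ((0:Int) - 1) hd rfl (by omega)]
  -- drop k elements all ≤ n+1 and all ≥ 1
  have hdrop : ∀ x ∈ d2.drop (i+1), 0 < x ∧ x ≤ n := fun x hx => hd x (List.mem_of_mem_drop hx)
  have hfull : (d2.drop (i+1)).filter (fun v => decide (v ≤ n+1)) = d2.drop (i+1) := by
    apply List.filter_eq_self.mpr
    intro x hx
    have := hdrop x hx
    simp; omega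
  have hempty : (d2.drop (i+1)).filter (fun v => decide (v ≤ (0:Int)-1)) = [] := by
    apply List.filter_eq_nil_iff.mpr
    intro x hx
    have := hdrop x hx
    simp; omega
  rw [hfull, hempty]
  rw [pvSum_const_one (d2.drop (i+1)) (fun v => decide (v ≤ g[i] + 1 - 1))]
  have hlen : ((d2.drop (i+1)).map (fun _ => (1:Int))).sum = ((d2.drop (i+1)).length : Int) := by
    rw [List.map_const', List.sum_replicate, nsmul_eq_mul, mul_one]
  rw [hlen]
  simp only [List.map_nil, List.sum_nil, sub_zero]
  have hms := pvMinSplit (d2.drop (i+1)) (g[i] + 1)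
  rw [show g[i] + 1 - 1 = g[i] from by ring] at *
  rw [show (((d2.drop (i+1)).filter (fun v => decide (v ≤ g[i]))).map (fun v => v)).sum
      = ((d2.drop (i+1)).map (fun x => min (g[i] + 1) x)).sum
        - (((d2.drop (i+1)).length : Int) - ((d2.drop (i+1)).countP (fun v => decide (v ≤ g[i])) : Int)) * (g[i] + 1) from by
    rw [← hms]; ring_nf]
  rw [pvContrib]
  rw [List.getD_eq_getElem g 0 hi]
  rw [show List.drop (i+1) (List.map (fun num => n - num) g)
      = (List.drop (i+1) g).map (fun num => n - num) from by simp]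
  rw [List.map_map]
  ring_nf
  rfl

theorem pvPhase1 (size : Int) (l : List Int) (k : Int) (tS tC : PySem.Dict Int Int) :
    (PySem.List.enumerate l k).foldl
        (fun t p => (pvBitAdd size t.1 p.2 p.2, pvBitAdd size t.2 p.2 1)) (tS, tC)
      = (pvAdds size tS (l.map (fun v => (v, v))), pvAdds size tC (l.map (fun v => (v, (1:Int))))) := by
  induction l generalizing k tS tC with
  | nil => simp [pysem, pvAdds]
  | cons x xs ih =>
    rw [show PySem.List.enumerate (x :: xs) k = (k, x) :: PySem.List.enumerate xs (k+1) from by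
      simp [pysem]]
    rw [List.foldl_cons]
    rw [ih (k+1)]
    simp [pvAdds]

theorem pvPhase2 (n : Int) (g : List Int) (res : Int) (hg : ∀ x ∈ g, 0 ≤ x ∧ x < n)
    (i : Nat) (hi : i ≤ g.length) :
    (PySem.List.pyRange 0 (i : Int)).foldl
      (fun (st : PySem.Dict Int Int × PySem.Dict Int Int × Int) j =>
        let bitSum := pvBitAdd (n+10) st.1 (PySem.List.pyGetD (g.map (fun num => n - num)) j 0)
            (-(PySem.List.pyGetD (g.map (fun num => n - num)) j 0))
        let bitCount := pvBitAdd (n+10) st.2.1 (PySem.List.pyGetD (g.map (fun num => n - num)) j 0) (-1)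
        let rightBigger := pvQueryRange (n+10) bitCount (PySem.List.pyGetD (g.map (fun num => num + 1)) j 0) (n + 1)
        let rightSmallSum := pvQueryRange (n+10) bitSum 0 (PySem.List.pyGetD (g.map (fun num => num + 1)) j 0 - 1)
        (bitSum, bitCount, st.2.2 - (rightBigger * PySem.List.pyGetD (g.map (fun num => num + 1)) j 0 + rightSmallSum)))
      (pvAdds (n+10) PySem.Dict.empty ((g.map (fun num => n - num)).map (fun v => (v, v))),
       pvAdds (n+10) PySem.Dict.empty ((g.map (fun num => n - num)).map (fun v => (v, (1:Int)))),
       res)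
    = (pvAdds (n+10) PySem.Dict.empty ((g.map (fun num => n - num)).map (fun v => (v, v))
          ++ (((g.map (fun num => n - num)).take i).map (fun v => (v, -v)))),
       pvAdds (n+10) PySem.Dict.empty ((g.map (fun num => n - num)).map (fun v => (v, (1:Int)))
          ++ (((g.map (fun num => n - num)).take i).map (fun v => (v, (-1:Int))))),
       res - ((List.range i).map (pvContrib n g)).sum) := by
  induction i with
  | zero => simp [PySem.List.pyRange_one_eq_nil]
  | succ i ih =>
    have hi' : i < g.length := by omega
    have hmlen : i < (g.map (fun num => n - num)).length := by simpa using hi'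
    rw [show ((i+1 : Nat) : Int) = (i : Int) + 1 from by push_cast; ring]
    rw [PySem.List.pyRange_one_succ_right (by positivity)]
    rw [List.foldl_append, ih (by omega)]
    simp only [List.foldl_cons, List.foldl_nil]
    have hd2i : PySem.List.pyGetD (g.map (fun num => n - num)) (i : Int) 0 = n - g[i] := by
      rw [PySem.List.pyGetD_natCast, List.getD_eq_getElem _ _ hmlen]
      simp
    have hd1i : PySem.List.pyGetD (g.map (fun num => num + 1)) (i : Int) 0 = g[i] + 1 := by
      rw [PySem.List.pyGetD_natCast, List.getD_eq_getElem _ _ (by simpa using hi')]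
      simp
    rw [hd2i, hd1i]
    have htake : ((g.map (fun num => n - num)).take (i+1)) = ((g.map (fun num => n - num)).take i) ++ [n - g[i]] := by
      rw [List.take_succ]
      congr 1
      rw [List.getElem?_eq_getElem hmlen]
      simp
    have hts : pvBitAdd (n+10)
        (pvAdds (n+10) PySem.Dict.empty ((g.map (fun num => n - num)).map (fun v => (v, v))
          ++ (((g.map (fun num => n - num)).take i).map (fun v => (v, -v)))))
        (n - g[i]) (-(n - g[i]))
        = pvAdds (n+10) PySem.Dict.empty ((g.map (fun num => n - num)).map (fun v => (v, v))
          ++ (((g.map (fun num => n - num)).take (i+1)).map (fun v => (v, -v)))) := by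
      rw [htake, List.map_append, ← List.append_assoc]
      simp [pvAdds]
    have htc : pvBitAdd (n+10)
        (pvAdds (n+10) PySem.Dict.empty ((g.map (fun num => n - num)).map (fun v => (v, (1:Int)))
          ++ (((g.map (fun num => n - num)).take i).map (fun v => (v, (-1:Int))))))
        (n - g[i]) (-1)
        = pvAdds (n+10) PySem.Dict.empty ((g.map (fun num => n - num)).map (fun v => (v, (1:Int)))
          ++ (((g.map (fun num => n - num)).take (i+1)).map (fun v => (v, (-1:Int))))) := by
      rw [htake, List.map_append, ← List.append_assoc]
      simp [pvAdds]
    rw [hts, htc]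
    simp only [Prod.mk.injEq]
    refine ⟨trivial, trivial, ?_⟩
    rw [List.range_succ, List.map_append, List.sum_append]
    have := pvStepContrib n g i hi' hg
    simp only [List.map_cons, List.map_nil, List.sum_cons, List.sum_nil]
    rw [show g[i] + 1 - 1 = g[i] from by ring] at this ⊢
    omega

theorem pvGroupB (n : Int) (g : List Int) (res : Int) :
    (PySem.List.pyRange 0 (g.length : Int)).foldl (fun res a =>
        (PySem.List.slice g (some (a + 1))).foldl
          (fun res y => res - min (PySem.List.pyGetD g a 0 + 1) (n - y)) res) res
      = res - pvS n g := by
  have main : ∀ i : Nat, i ≤ g.length →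
      (PySem.List.pyRange 0 (i : Int)).foldl (fun res a =>
        (PySem.List.slice g (some (a + 1))).foldl
          (fun res y => res - min (PySem.List.pyGetD g a 0 + 1) (n - y)) res) res
      = res - ((List.range i).map (pvContrib n g)).sum := by
    intro i hi
    induction i with
    | zero => simp [PySem.List.pyRange_one_eq_nil]
    | succ i ih =>
      rw [show ((i+1 : Nat) : Int) = (i : Int) + 1 from by push_cast; ring]
      rw [PySem.List.pyRange_one_succ_right (by positivity), List.foldl_append, ih (by omega)]
      simp only [List.foldl_cons, List.foldl_nil]
      rw [PySem.List.slice_from g (by positivity : (0:Int) ≤ (i : Int) + 1)]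
      rw [show ((i : Int) + 1).toNat = i + 1 from by omega]
      rw [pvFoldl_sub, PySem.List.pyGetD_natCast]
      rw [List.range_succ, List.map_append, List.sum_append]
      simp only [List.map_cons, List.map_nil, List.sum_cons, List.sum_nil]
      rw [pvContrib]
      ring
  exact main g.length le_rfl

theorem pvS_len_one (n : Int) (g : List Int) (h : g.length = 1) : pvS n g = 0 := by
  obtain ⟨x, rfl⟩ := List.length_eq_one_iff.mp h
  simp [pvS, pvContrib]

theorem pvGroupA (n : Int) (g : List Int) (res : Int) (hg : ∀ x ∈ g, 0 ≤ x ∧ x < n) :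
    (if g.length = 1 then res
     else
       ((PySem.List.pyRange 0 (g.length : Int)).foldl
          (fun (st : PySem.Dict Int Int × PySem.Dict Int Int × Int) i =>
            (pvBitAdd (n+10) st.1 (PySem.List.pyGetD (g.map (fun num => n - num)) i 0)
                (-(PySem.List.pyGetD (g.map (fun num => n - num)) i 0)),
             pvBitAdd (n+10) st.2.1 (PySem.List.pyGetD (g.map (fun num => n - num)) i 0) (-1),
             st.2.2 - (pvQueryRange (n+10)
                  (pvBitAdd (n+10) st.2.1 (PySem.List.pyGetD (g.map (fun num => n - num)) i 0) (-1))
                  (PySem.List.pyGetD (g.map (fun num => num + 1)) i 0) (n + 1)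
                * PySem.List.pyGetD (g.map (fun num => num + 1)) i 0
                + pvQueryRange (n+10)
                  (pvBitAdd (n+10) st.1 (PySem.List.pyGetD (g.map (fun num => n - num)) i 0)
                    (-(PySem.List.pyGetD (g.map (fun num => n - num)) i 0)))
                  0 (PySem.List.pyGetD (g.map (fun num => num + 1)) i 0 - 1))))
          (((PySem.List.enumerate (g.map (fun num => n - num))).foldl
              (fun (t : PySem.Dict Int Int × PySem.Dict Int Int) p =>
                (pvBitAdd (n+10) t.1 p.2 p.2, pvBitAdd (n+10) t.2 p.2 1))
              (PySem.Dict.empty, PySem.Dict.empty)).1,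
           ((PySem.List.enumerate (g.map (fun num => n - num))).foldl
              (fun (t : PySem.Dict Int Int × PySem.Dict Int Int) p =>
                (pvBitAdd (n+10) t.1 p.2 p.2, pvBitAdd (n+10) t.2 p.2 1))
              (PySem.Dict.empty, PySem.Dict.empty)).2,
           res)).2.2)
      = res - pvS n g := by
  by_cases hlen : g.length = 1
  · rw [if_pos hlen, pvS_len_one n g hlen]; ring
  · rw [if_neg hlen]
    rw [pvPhase1]
    have h2 := pvPhase2 n g res hg g.length le_rfl
    simp only [List.take_length] at h2
    exact congrArg (fun t => t.2.2) h2


theorem pvGetD_values {d : PySem.Dict Int (List Int)} {k : Int} {x : Int} (hx : x ∈ d.getD k []) :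
    ∃ w ∈ d.values, x ∈ w := by
  rw [PySem.Dict.getD_eq_get?_getD] at hx
  cases h : d.get? k with
  | none => rw [h] at hx; simp at hx
  | some v =>
      rw [h] at hx
      refine ⟨v, ?_, hx⟩
      have hm := PySem.Dict.mem_items_of_get?_eq_some d h
      simp only [PySem.Dict.values]
      exact List.mem_map.mpr ⟨(k, v), hm, rfl⟩

theorem pvFoldBound (P : Int → Prop) : ∀ (l : List (Int × Int)) (d : PySem.Dict Int (List Int)),
    (∀ p ∈ l, P p.1) → (∀ w ∈ d.values, ∀ x ∈ w, P x) →
    ∀ w ∈ (l.foldl (fun d p => d.modify p.2 [] (fun s => s ++ [p.1])) d).values, ∀ x ∈ w, P x := by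
  intro l
  induction l with
  | nil => intro d _ h2; simpa using h2
  | cons p rest ih =>
      intro d h1 h2
      rw [List.foldl_cons]
      apply ih _ (fun q hq => h1 q (List.mem_cons_of_mem _ hq))
      intro w hw x hx
      rw [show d.modify p.2 [] (fun s => s ++ [p.1]) = d.insert p.2 (d.getD p.2 [] ++ [p.1]) from rfl] at hw
      rcases PySem.Dict.mem_values_insert d _ _ _ hw with rfl | hw2
      · rcases List.mem_append.mp hx with hxl | hxr
        · obtain ⟨w2, hw2, hx2⟩ := pvGetD_values hxl
          exact h2 w2 hw2 x hx2
        · simp at hxr; subst hxr; exact h1 p (List.mem_cons_self ..)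
      · exact h2 w hw2 x hx

theorem pvValuesBound (nums : List Int) :
    ∀ w ∈ ((PySem.List.enumerate nums).foldl
        (fun d p => d.modify p.2 [] (fun l => l ++ [p.1])) PySem.Dict.empty).values,
      ∀ x ∈ w, 0 ≤ x ∧ x < (nums.length : Int) := by
  apply pvFoldBound
  · intro p hp
    rw [PySem.List.enumerate_eq_map_pyRange nums 0] at hp
    obtain ⟨j, hj, rfl⟩ := List.mem_map.mp hp
    have := PySem.List.mem_pyRange_one.mp hj
    simpa [PySem.List.len] using this
  · intro w hw
    simp [PySem.Dict.values, PySem.Dict.empty] at hw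

-- ===== VERDICT (by name: the statement is the Claim_ definition above) =====
theorem makeItPalindrome_spec : Claim_equal_makeItPalindrome := by
  intro nums _
  unfold Spec_makeItPalindrome
  unfold makeItPalindrome makeItPalindrome_alt
  simp only [PySem.List.foldl_add, zero_add]
  apply PySem.List.foldl_congr_mem
  intro acc g hmem
  have hg := pvValuesBound nums g hmem
  exact (pvGroupA _ g acc hg).trans (pvGroupB _ g acc).symm
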